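-- pv_equiv track=rewrite | github.com/Lorenatorr/Algoritmos_python | horarios.py | verificar_turnos
-- ===== SOURCE A (Python) =====
-- def verificar_turnos(empleados):
--     resultados = []
--     for i, empleado in enumerate(empleados):
--         cumple = True
--         for j in range(len(empleado) - 2):
--             # Verifica si hay 3 días consecutivos con valor 1
--             if empleado[j] == 1 and empleado[j + 1] == 1 and empleado[j + 2] == 1:
--                 cumple = False
--                 break
--         resultados.append(cumple)
--     return resultados
-- ===== SOURCE B (Python) =====
-- def verificar_turnos(empleados):
--     resultados = []
--     for empleado in empleados:
--         cumple = True
--         streak = 0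
--         for v in empleado:
--             streak = streak + 1 if v == 1 else 0
--             if streak >= 3:
--                 cumple = False
--                 break
--         resultados.append(cumple)
--     return resultados
-- ===== Notes on version B (the rewrite author's own statement) =====
-- stated objective: alternative
-- what changed: Replaced the triple-offset window lookup over range(len-2) with a single pass per employee that maintains a running streak counter of consecutive 1s, breaking when it reaches 3; no indexed lookahead.
import Mathlib
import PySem

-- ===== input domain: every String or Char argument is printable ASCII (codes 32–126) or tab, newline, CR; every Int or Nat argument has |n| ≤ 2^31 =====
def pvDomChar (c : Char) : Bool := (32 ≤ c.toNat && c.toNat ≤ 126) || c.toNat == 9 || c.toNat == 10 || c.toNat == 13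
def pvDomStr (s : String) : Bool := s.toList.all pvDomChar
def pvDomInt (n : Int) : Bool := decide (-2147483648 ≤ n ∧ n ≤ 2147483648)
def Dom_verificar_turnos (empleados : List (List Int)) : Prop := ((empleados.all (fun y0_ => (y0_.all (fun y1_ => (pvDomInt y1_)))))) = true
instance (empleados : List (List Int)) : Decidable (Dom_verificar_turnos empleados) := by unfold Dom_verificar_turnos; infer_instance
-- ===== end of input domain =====

-- B replaces A's triple-offset indexed window scan with a single pass keeping a running
-- streak counter of consecutive 1s (alternative decomposition, same cost).


-- ===== PORT A =====
-- inner 'for j in range(len(empleado)-2): … break' loop, with 'cumple' made the result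
def vtInnerA (e : List Int) : List Int → Bool
  | [] => true
  | j :: js =>
    if (PySem.List.pyGetD e j 0 == 1 && PySem.List.pyGetD e (j + 1) 0 == 1
        && PySem.List.pyGetD e (j + 2) 0 == 1) then false
    else vtInnerA e js

def verificar_turnos (empleados : List (List Int)) : List Bool :=
  empleados.foldl
    (fun resultados empleado =>
      resultados ++ [vtInnerA empleado (PySem.List.pyRange 0 ((empleado.length : Int) - 2) 1)])
    []

-- ===== PORT B =====
-- inner 'for v in empleado' loop maintaining the streak counter, with break
def vtInnerB : List Int → Int → Bool
  | [], _ => true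
  | v :: rest, streak =>
    let s := if v == 1 then streak + 1 else 0
    if s ≥ 3 then false else vtInnerB rest s

def verificar_turnos_alt (empleados : List (List Int)) : List Bool :=
  empleados.foldl (fun resultados empleado => resultados ++ [vtInnerB empleado 0]) []

-- ===== PRECONDITION & SPEC =====
def Spec_verificar_turnos (empleados : List (List Int)) (out : List Bool) : Prop := out = verificar_turnos_alt empleados
instance (empleados : List (List Int)) (out : List Bool) : Decidable (Spec_verificar_turnos empleados out) := by unfold Spec_verificar_turnos; infer_instance

-- ===== CLAIM (what is proved, stated in full; the proofs are below) =====
def Claim_equal_verificar_turnos : Prop := ∀ (empleados : List (List Int)), Dom_verificar_turnos empleados → Spec_verificar_turnos empleados (verificar_turnos empleados)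

-- ===== LEMMAS AND PROOFS =====

-- sliding-window characterisation both inner loops equal
def vtSlide : List Int → Bool
  | a :: b :: c :: r => if a == 1 && b == 1 && c == 1 then false else vtSlide (b :: c :: r)
  | _ => true

lemma vtInnerA_shift (x : Int) (e : List Int) (js : List Int) (h : ∀ j ∈ js, 0 ≤ j) :
    vtInnerA (x :: e) (js.map (· + 1)) = vtInnerA e js := by
  induction js with
  | nil => rfl
  | cons j js ih =>
    have hj : 0 ≤ j := h j (by simp)
    have g : ∀ k : Int, 0 ≤ k → PySem.List.pyGetD (x :: e) (k + 1) 0 = PySem.List.pyGetD e k 0 := by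
      intro k hk
      obtain ⟨n, rfl⟩ := Int.eq_ofNat_of_zero_le hk
      rw [show ((n : Int) + 1) = ((n + 1 : Nat) : Int) by push_cast; ring]
      rw [PySem.List.pyGetD_natCast, PySem.List.pyGetD_natCast]
      simp
    simp only [List.map_cons, vtInnerA]
    rw [show j + 1 + 1 = (j + 1) + 1 by ring, show j + 1 + 2 = (j + 2) + 1 by ring,
        g j hj, g (j + 1) (by omega), g (j + 2) (by omega)]
    split
    · rfl
    · exact ih (fun k hk => h k (by simp [hk]))

lemma pyRange_shift (b : Int) :
    PySem.List.pyRange 1 (b + 1) 1 = (PySem.List.pyRange 0 b 1).map (· + 1) := by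
  rw [PySem.List.pyRange_one, PySem.List.pyRange_one]
  have : b + 1 - 1 = b - 0 := by ring
  rw [this, List.map_map]
  exact List.map_congr_left (fun k _ => by simp; ring)

lemma vtInnerA_eq_vtSlide (e : List Int) :
    vtInnerA e (PySem.List.pyRange 0 ((e.length : Int) - 2) 1) = vtSlide e := by
  induction e with
  | nil => rfl
  | cons a t ih =>
    match t with
    | [] => rfl
    | [b] => rfl
    | b :: c :: r =>
      have hlen : ((a :: b :: c :: r).length : Int) - 2 = (r.length : Int) + 1 := by
        simp; omega
      rw [hlen, PySem.List.pyRange_one_cons (by omega)]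
      show vtInnerA (a :: b :: c :: r) (0 :: PySem.List.pyRange (0 + 1) (↑r.length + 1) 1) = _
      simp only [vtInnerA]
      have g0 : PySem.List.pyGetD (a :: b :: c :: r) 0 0 = a := by
        rw [show (0 : Int) = ((0 : Nat) : Int) by norm_num, PySem.List.pyGetD_natCast]; simp
      have g1 : PySem.List.pyGetD (a :: b :: c :: r) (0 + 1) 0 = b := by
        rw [show (0 : Int) + 1 = ((1 : Nat) : Int) by norm_num, PySem.List.pyGetD_natCast]; simp
      have g2 : PySem.List.pyGetD (a :: b :: c :: r) (0 + 2) 0 = c := by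
        rw [show (0 : Int) + 2 = ((2 : Nat) : Int) by norm_num, PySem.List.pyGetD_natCast]; simp
      rw [g0, g1, g2]
      have hrest : vtInnerA (a :: b :: c :: r) (PySem.List.pyRange (0 + 1) (↑r.length + 1) 1)
          = vtInnerA (b :: c :: r) (PySem.List.pyRange 0 (((b :: c :: r).length : Int) - 2) 1) := by
        have hlen2 : ((b :: c :: r).length : Int) - 2 = (r.length : Int) := by simp; omega
        rw [hlen2, show (0 : Int) + 1 = 1 by ring, pyRange_shift]
        exact vtInnerA_shift a (b :: c :: r) _
          (fun j hj => ((PySem.List.mem_pyRange_one).1 hj).1)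
      rw [hrest, ih]
      rfl

lemma vtSlide_cons_ne (v : Int) (rest : List Int) (hv : (v == 1) = false) :
    vtSlide (v :: rest) = vtSlide rest := by
  match rest with
  | [] => rfl
  | [b] => rfl
  | b :: c :: r => simp [vtSlide, hv]

lemma vtInnerB_eq_vtSlide (e : List Int) (s : Int) (hs : s = 0 ∨ s = 1 ∨ s = 2) :
    vtInnerB e s = vtSlide (List.replicate s.toNat 1 ++ e) := by
  induction e generalizing s with
  | nil => rcases hs with h | h | h <;> subst h <;> rfl
  | cons v rest ih =>
    by_cases hv : v = 1
    · subst hv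
      rcases hs with h | h | h <;> subst h
      · show vtInnerB (1 :: rest) 0 = vtSlide (1 :: rest)
        simp only [vtInnerB]
        norm_num
        exact ih 1 (by omega)
      · show vtInnerB (1 :: rest) 1 = vtSlide (1 :: 1 :: rest)
        simp only [vtInnerB]
        norm_num
        exact ih 2 (by omega)
      · show vtInnerB (1 :: rest) 2 = vtSlide (1 :: 1 :: 1 :: rest)
        simp only [vtInnerB]
        norm_num [vtSlide]
    · have hv' : (v == 1) = false := by simp [hv]
      have step : vtInnerB (v :: rest) s = vtInnerB rest 0 := by
        simp only [vtInnerB, hv']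
        norm_num
      rw [step, ih 0 (by omega)]
      rcases hs with h | h | h <;> subst h
      · exact (vtSlide_cons_ne v rest hv').symm
      · show vtSlide rest = vtSlide (1 :: v :: rest)
        rw [show vtSlide (1 :: v :: rest) = vtSlide (v :: rest) from ?_,
            vtSlide_cons_ne v rest hv']
        match rest with
        | [] => rfl
        | b :: r => simp [vtSlide, hv']
      · show vtSlide rest = vtSlide (1 :: 1 :: v :: rest)
        rw [show vtSlide (1 :: 1 :: v :: rest) = vtSlide (1 :: v :: rest) by simp [vtSlide, hv'],
            show vtSlide (1 :: v :: rest) = vtSlide (v :: rest) from ?_,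
            vtSlide_cons_ne v rest hv']
        match rest with
        | [] => rfl
        | b :: r => simp [vtSlide, hv']

lemma inner_eq (e : List Int) :
    vtInnerA e (PySem.List.pyRange 0 ((e.length : Int) - 2) 1) = vtInnerB e 0 := by
  rw [vtInnerA_eq_vtSlide, vtInnerB_eq_vtSlide e 0 (by omega)]
  rfl

-- ===== VERDICT (by name: the statement is the Claim_ definition above) =====
theorem verificar_turnos_spec : Claim_equal_verificar_turnos := by
  intro empleados _
  unfold Spec_verificar_turnos verificar_turnos verificar_turnos_alt
  congr 1
  funext resultados empleado
  rw [inner_eq]
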